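-- pv_equiv track=rewrite | github.com/sanderslab/five_tr_chip | analysis_code_NeuroDevEpi.py | process_last_matches
-- ===== SOURCE A (Python) =====
-- def process_last_matches(coord, chromo, gene_set, pdict):
--     out_list = []
--     union_list = []
--     bed_list = []
--     gene_here = {}
--     peak_here = {}
--     max_gene_count = len(gene_set)
--     max_gene_list_str = ','.join(sorted(list(gene_set)))
--
--     if max_gene_count >= 1:
--         coord_sort = sorted(list(coord))
--         union_start = coord_sort[0]
--         union_end = coord_sort[-1]
--         for i in range(len(coord_sort)-1):
--             pos = coord_sort[i]
--             next_pos = coord_sort[i+1]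
--             features = coord[pos].split('|')
--             for feature in features:
--                 if feature.startswith('s_'):
--                     peak = feature.replace('s_', '')
--                     peak_here[peak] = 5
--                     gene_here[pdict[peak]['gene']] = 5
--                 elif feature.startswith('e_'):
--                     peak = feature.replace('e_', '')
--                     del peak_here[peak]
--                     gene_here.pop(pdict[peak]['gene'], None)
--
--             peak_list_str = ','.join(sorted(list(peak_here)))
--             gene_list_str = ','.join(sorted(list(gene_here)))
--             gene_count = len(gene_here)
--             peak_count = len(peak_here)
--             outline = f'{chromo}\t{pos}\t{next_pos}\t{union_start}\t{union_end}\t{max_gene_count}\t{max_gene_list_str}\t{peak_count}\t{peak_list_str}\t{gene_count}\t{gene_list_str}\n'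
--             bedline = f'{chromo}\t{pos}\t{next_pos}\t{gene_count}\n'
--             out_list.append(outline)
--             bed_list.append(bedline)
--
--         outline_union = f'{chromo}\t{union_start}\t{union_end}\t{max_gene_count}\t{max_gene_list_str}\n'
--         union_list.append(outline_union)
--
--     return out_list, bed_list, union_list
-- ===== SOURCE B (Python) =====
-- def _ins(xs, x):
--     # return a new sorted duplicate-free list with x inserted
--     i = 0
--     while i < len(xs) and xs[i] < x:
--         i += 1
--     if i < len(xs) and xs[i] == x:
--         return xs
--     return xs[:i] + [x] + xs[i:]
--
--
-- def _rm(xs, x):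
--     # return a new list with the first occurrence of x removed (no-op if absent)
--     i = 0
--     while i < len(xs) and xs[i] != x:
--         i += 1
--     if i == len(xs):
--         return xs
--     return xs[:i] + xs[i+1:]
--
--
-- def process_last_matches(coord, chromo, gene_set, pdict):
--     if not gene_set:
--         return [], [], []
--     cdict = dict(coord)
--     positions = sorted(cdict)
--     union_start, union_end = positions[0], positions[-1]
--     max_gene_list_str = ','.join(sorted(gene_set))
--     # stage 1: snapshot the sorted active peak/gene lists after each position but the last
--     snaps = []
--     peaks, genes = [], []
--     for pos in positions[:-1]:
--         for f in cdict[pos].split('|'):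
--             if f.startswith('s_'):
--                 p = f.replace('s_', '')
--                 peaks = _ins(peaks, p)
--                 genes = _ins(genes, pdict[p]['gene'])
--             elif f.startswith('e_'):
--                 p = f.replace('e_', '')
--                 peaks = _rm(peaks, p)
--                 genes = _rm(genes, pdict[p]['gene'])
--         snaps.append((peaks, genes))
--     # stage 2: format the three outputs from the segments and snapshots
--     segs = list(zip(positions, positions[1:]))
--     out_list = ['\t'.join([chromo, str(a), str(b), str(union_start), str(union_end),
--                            str(len(gene_set)), max_gene_list_str,
--                            str(len(pk)), ','.join(pk), str(len(gn)), ','.join(gn)]) + '\n'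
--                 for (a, b), (pk, gn) in zip(segs, snaps)]
--     bed_list = ['\t'.join([chromo, str(a), str(b), str(len(gn))]) + '\n'
--                 for (_, gn), (a, b) in zip(snaps, segs)]
--     union_list = ['\t'.join([chromo, str(union_start), str(union_end),
--                              str(len(gene_set)), max_gene_list_str]) + '\n']
--     return out_list, bed_list, union_list
-- ===== Notes on version B (the rewrite author's own statement) =====
-- stated objective: alternative
-- what changed: A is a single sweep that re-sorts the active peak/gene dicts and formats both output lines at every segment; B is staged: one scan maintains sorted duplicate-free active lists by ordered insert/remove and records a snapshot per segment, then the out/bed/union lines are produced by separate zip/map comprehensions over (segment, snapshot) pairs using '\t'.join, so no per-segment sorting happens at all.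
import Mathlib
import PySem

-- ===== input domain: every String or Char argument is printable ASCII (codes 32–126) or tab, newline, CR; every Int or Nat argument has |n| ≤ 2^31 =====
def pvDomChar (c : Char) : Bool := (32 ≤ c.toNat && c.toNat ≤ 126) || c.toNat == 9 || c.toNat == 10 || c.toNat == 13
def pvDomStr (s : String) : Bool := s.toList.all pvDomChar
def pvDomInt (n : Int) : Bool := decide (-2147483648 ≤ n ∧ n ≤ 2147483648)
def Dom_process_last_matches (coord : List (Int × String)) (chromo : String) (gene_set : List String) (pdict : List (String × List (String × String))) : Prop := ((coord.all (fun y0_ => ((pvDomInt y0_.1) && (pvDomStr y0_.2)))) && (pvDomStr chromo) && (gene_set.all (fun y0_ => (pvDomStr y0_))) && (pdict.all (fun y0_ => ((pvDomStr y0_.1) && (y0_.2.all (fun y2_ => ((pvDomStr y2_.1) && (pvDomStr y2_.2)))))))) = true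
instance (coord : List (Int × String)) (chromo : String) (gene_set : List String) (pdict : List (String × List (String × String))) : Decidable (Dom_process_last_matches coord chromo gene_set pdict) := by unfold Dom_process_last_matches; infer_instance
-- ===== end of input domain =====

-- B replaces A's single sweep (re-sorting the active dicts and emitting both lines at each
-- segment) by staged passes: one scan records snapshots of incrementally maintained sorted
-- active peak/gene lists, then the three outputs are formatted by zip/map comprehensions
-- over segments and snapshots with '\t'.join; objective: alternative.

-- ===== PORT A =====
-- shared helper: the Python dict-of-dicts pdict, exactly dict(pdict) with dict values
def pvPdict (pdict : List (String × List (String × String))) : PySem.Dict String (PySem.Dict String String) :=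
  PySem.Dict.ofList (pdict.map (fun q => (q.1, PySem.Dict.ofList q.2)))

-- shared helper: pdict[peak]['gene'] — total stand-in (defaults are only reached outside Pre_,
-- exactly where the Python raises KeyError)
def pvGene (pd : PySem.Dict String (PySem.Dict String String)) (p : String) : String :=
  (pd.getD p PySem.Dict.empty).getD "gene" ""

-- A's inner `for feature in features` body, acting on (peak_here, gene_here)
def pvStepA (pd : PySem.Dict String (PySem.Dict String String))
    (st : PySem.Dict String Int × PySem.Dict String Int) (f : String) :
    PySem.Dict String Int × PySem.Dict String Int :=
  if PySem.Str.startswith f "s_" then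
    let p := PySem.Str.replace f "s_" ""
    (st.1.insert p 5, st.2.insert (pvGene pd p) 5)
  else if PySem.Str.startswith f "e_" then
    let p := PySem.Str.replace f "e_" ""
    -- del peak_here[peak] (raises outside Pre_); gene_here.pop(..., None)
    (st.1.erase p, st.2.erase (pvGene pd p))
  else st

-- A's `for i in range(len(coord_sort)-1)` loop over adjacent sorted positions
def pvLoopA (cd : PySem.Dict Int String) (pd : PySem.Dict String (PySem.Dict String String))
    (chromo us ue mgcs mgl : String) :
    List Int → PySem.Dict String Int × PySem.Dict String Int → List String × List String
  | [], _ => ([], [])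
  | [_], _ => ([], [])
  | pos :: next :: rest, st =>
      let st' := ((PySem.Str.split? (cd.getD pos "") "|").getD []).foldl (pvStepA pd) st
      let pls := PySem.Str.join "," (PySem.List.sorted st'.1.keys (fun x => x))
      let gls := PySem.Str.join "," (PySem.List.sorted st'.2.keys (fun x => x))
      let outline := chromo ++ "\t" ++ PySem.Int.toStr pos ++ "\t" ++ PySem.Int.toStr next ++ "\t" ++ us ++ "\t" ++ ue ++ "\t" ++ mgcs ++ "\t" ++ mgl ++ "\t" ++ PySem.Int.toStr (st'.1.size : Int) ++ "\t" ++ pls ++ "\t" ++ PySem.Int.toStr (st'.2.size : Int) ++ "\t" ++ gls ++ "\n"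
      let bedline := chromo ++ "\t" ++ PySem.Int.toStr pos ++ "\t" ++ PySem.Int.toStr next ++ "\t" ++ PySem.Int.toStr (st'.2.size : Int) ++ "\n"
      let r := pvLoopA cd pd chromo us ue mgcs mgl (next :: rest) st'
      (outline :: r.1, bedline :: r.2)

def process_last_matches (coord : List (Int × String)) (chromo : String) (gene_set : List String) (pdict : List (String × List (String × String))) : List String × List String × List String :=
  let mgc : Int := PySem.List.len gene_set
  let mgl := PySem.Str.join "," (PySem.List.sorted gene_set (fun x => x))
  if 1 ≤ mgc then
    let cd := PySem.Dict.ofList coord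
    let coord_sort := PySem.List.sorted cd.keys (fun x => x)
    -- coord_sort[0] / coord_sort[-1]: IndexError on an empty dict is outside Pre_
    let us := PySem.List.pyGetD coord_sort 0 0
    let ue := PySem.List.pyGetD coord_sort (-1) 0
    let r := pvLoopA cd (pvPdict pdict) chromo (PySem.Int.toStr us) (PySem.Int.toStr ue) (PySem.Int.toStr mgc) mgl coord_sort (PySem.Dict.empty, PySem.Dict.empty)
    (r.1, r.2, [chromo ++ "\t" ++ PySem.Int.toStr us ++ "\t" ++ PySem.Int.toStr ue ++ "\t" ++ PySem.Int.toStr mgc ++ "\t" ++ mgl ++ "\n"])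
  else ([], [], [])

-- ===== PORT B =====
-- _ins: new sorted duplicate-free list with x inserted
def pvIns : List String → String → List String
  | [], x => [x]
  | h :: t, x => if h < x then h :: pvIns t x else if h = x then h :: t else x :: h :: t

-- _rm: new list with the first occurrence of x removed (no-op if absent)
def pvRm : List String → String → List String
  | [], _ => []
  | h :: t, x => if h = x then t else h :: pvRm t x

-- B's inner feature loop, producing the next (peaks, genes) pair of sorted lists
def pvUpd (pd : PySem.Dict String (PySem.Dict String String))
    (st : List String × List String) (f : String) : List String × List String :=
  if PySem.Str.startswith f "s_" then
    let p := PySem.Str.replace f "s_" ""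
    (pvIns st.1 p, pvIns st.2 (pvGene pd p))
  else if PySem.Str.startswith f "e_" then
    let p := PySem.Str.replace f "e_" ""
    (pvRm st.1 p, pvRm st.2 (pvGene pd p))
  else st

-- stage 1: `snaps` — the state after processing each position of positions[:-1]
def pvSnaps (cd : PySem.Dict Int String) (pd : PySem.Dict String (PySem.Dict String String)) :
    List Int → List String × List String → List (List String × List String)
  | [], _ => []
  | pos :: ps, st =>
      let st' := ((PySem.Str.split? (cd.getD pos "") "|").getD []).foldl (pvUpd pd) st
      st' :: pvSnaps cd pd ps st'

-- stage 2 formatters: the two comprehension bodies ('\t'.join([...]) + '\n')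
def pvOutF (chromo us ue mgcs mgl : String) (q : (Int × Int) × (List String × List String)) : String :=
  PySem.Str.join "\t" [chromo, PySem.Int.toStr q.1.1, PySem.Int.toStr q.1.2, us, ue, mgcs, mgl,
    PySem.Int.toStr (PySem.List.len q.2.1), PySem.Str.join "," q.2.1,
    PySem.Int.toStr (PySem.List.len q.2.2), PySem.Str.join "," q.2.2] ++ "\n"

def pvBedF (chromo : String) (q : (List String × List String) × (Int × Int)) : String :=
  PySem.Str.join "\t" [chromo, PySem.Int.toStr q.2.1, PySem.Int.toStr q.2.2,
    PySem.Int.toStr (PySem.List.len q.1.2)] ++ "\n"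

def process_last_matches_alt (coord : List (Int × String)) (chromo : String) (gene_set : List String) (pdict : List (String × List (String × String))) : List String × List String × List String :=
  if gene_set.isEmpty then ([], [], [])
  else
    let cd := PySem.Dict.ofList coord
    let positions := PySem.List.sorted cd.keys (fun x => x)
    -- positions[0] / positions[-1]: IndexError on an empty dict is outside Pre_
    let us := PySem.List.pyGetD positions 0 0
    let ue := PySem.List.pyGetD positions (-1) 0
    let mgl := PySem.Str.join "," (PySem.List.sorted gene_set (fun x => x))
    let snaps := pvSnaps cd (pvPdict pdict) positions.dropLast ([], [])
    let segs := positions.zip (positions.drop 1)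
    let out_list := (segs.zip snaps).map
      (pvOutF chromo (PySem.Int.toStr us) (PySem.Int.toStr ue) (PySem.Int.toStr (PySem.List.len gene_set)) mgl)
    let bed_list := (snaps.zip segs).map (pvBedF chromo)
    (out_list, bed_list,
      [PySem.Str.join "\t" [chromo, PySem.Int.toStr us, PySem.Int.toStr ue,
        PySem.Int.toStr (PySem.List.len gene_set), mgl] ++ "\n"])

-- ===== PRECONDITION & SPEC =====
-- feature classification used by Pre_ (mirrors the startswith/replace branch of both Pythons)
def pvStart? (f : String) : Option String :=
  if PySem.Str.startswith f "s_" then some (PySem.Str.replace f "s_" "") else none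

def pvEnd? (f : String) : Option String :=
  if PySem.Str.startswith f "s_" then none
  else if PySem.Str.startswith f "e_" then some (PySem.Str.replace f "e_" "") else none

def pvPeak? (f : String) : Option String :=
  if PySem.Str.startswith f "s_" then some (PySem.Str.replace f "s_" "")
  else if PySem.Str.startswith f "e_" then some (PySem.Str.replace f "e_" "") else none

-- the pdict[peak]['gene'] lookup of feature f succeeds
def pvLookOk (pdict : List (String × List (String × String))) (f : String) : Bool :=
  (pvPeak? f).all (fun p => ((pvPdict pdict).get? p).any (fun d => d.contains "gene"))

-- the stream of features A processes: all positions but the last, in sorted order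
def pvFeats (coord : List (Int × String)) : List String :=
  let cd := PySem.Dict.ofList coord
  ((PySem.List.sorted cd.keys (fun x => x)).dropLast).flatMap
    (fun p => (PySem.Str.split? (cd.getD p "") "|").getD [])

-- Pre_ holds exactly where the Python A returns: when gene_set is non-empty, A raises
-- IndexError on an empty coord, KeyError when a processed s_/e_ feature's peak is missing
-- from pdict (or lacks 'gene'), and KeyError on `del peak_here[peak]` for an e_ feature
-- whose peak is not currently active (no earlier s_ without an intervening e_).
def Pre_process_last_matches (coord : List (Int × String)) (chromo : String) (gene_set : List String) (pdict : List (String × List (String × String))) : Prop :=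
  gene_set ≠ [] →
    (coord ≠ [] ∧
     (∀ f ∈ pvFeats coord, pvLookOk pdict f = true) ∧
     (∀ i ∈ List.range (pvFeats coord).length,
        (pvEnd? ((pvFeats coord).getD i "")).isSome = true →
        ∃ j ∈ List.range i,
          pvStart? ((pvFeats coord).getD j "") = pvEnd? ((pvFeats coord).getD i "") ∧
          ∀ m ∈ List.range i, j < m →
            pvEnd? ((pvFeats coord).getD m "") ≠ pvEnd? ((pvFeats coord).getD i "")))

instance (coord : List (Int × String)) (chromo : String) (gene_set : List String) (pdict : List (String × List (String × String))) : Decidable (Pre_process_last_matches coord chromo gene_set pdict) := by unfold Pre_process_last_matches; infer_instance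

def pvWitness_process_last_matches : (List (Int × String)) × String × List String × (List (String × List (String × String))) :=
  ([(0, "s_a"), (5, "e_a")], "chr1", ["g"], [("a", [("gene", "g")])])

def Spec_process_last_matches (coord : List (Int × String)) (chromo : String) (gene_set : List String) (pdict : List (String × List (String × String))) (out : List String × List String × List String) : Prop := out = process_last_matches_alt coord chromo gene_set pdict
instance (coord : List (Int × String)) (chromo : String) (gene_set : List String) (pdict : List (String × List (String × String))) (out : List String × List String × List String) : Decidable (Spec_process_last_matches coord chromo gene_set pdict out) := by unfold Spec_process_last_matches; infer_instance

-- ===== CLAIM (what is proved, stated in full; the proofs are below) =====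
def Claim_equal_process_last_matches : Prop := ∀ (coord : List (Int × String)) (chromo : String) (gene_set : List String) (pdict : List (String × List (String × String))), Dom_process_last_matches coord chromo gene_set pdict → Pre_process_last_matches coord chromo gene_set pdict → Spec_process_last_matches coord chromo gene_set pdict (process_last_matches coord chromo gene_set pdict)

-- ===== LEMMAS AND PROOFS =====

-- the invariant tying A's dict pair to B's sorted-list pair: B's lists are strictly
-- sorted and are rearrangements of A's dict keys
def pvRel (stA : PySem.Dict String Int × PySem.Dict String Int) (stB : List String × List String) : Prop :=
  stB.1.Pairwise (· < ·) ∧ stB.1.Perm stA.1.keys ∧ stB.2.Pairwise (· < ·) ∧ stB.2.Perm stA.2.keys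

theorem mem_pvIns (xs : List String) (x y : String) :
    y ∈ pvIns xs x ↔ y = x ∨ y ∈ xs := by
  induction xs with
  | nil => simp [pvIns]
  | cons z zs ih =>
      simp only [pvIns]
      split_ifs with hlt heq
      · simp [ih]; tauto
      · subst heq; simp [List.mem_cons]
      · simp [List.mem_cons]

theorem pairwise_pvIns {xs : List String} (h : xs.Pairwise (· < ·)) (x : String) :
    (pvIns xs x).Pairwise (· < ·) := by
  induction xs with
  | nil => simp [pvIns]
  | cons z zs ih =>
      rcases List.pairwise_cons.mp h with ⟨hz, hzs⟩
      simp only [pvIns]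
      split_ifs with h1 h2
      · refine List.pairwise_cons.mpr ⟨?_, ih hzs⟩
        intro b hb
        rcases (mem_pvIns zs x b).mp hb with rfl | hb
        · exact h1
        · exact hz b hb
      · exact h
      · have hx : x < z := lt_of_le_of_ne (le_of_not_gt h1) (Ne.symm h2)
        refine List.pairwise_cons.mpr ⟨?_, h⟩
        intro b hb
        rcases hb with _ | hb
        · exact hx
        · exact lt_trans hx (hz b (by assumption))

theorem perm_pvIns {xs : List String} (h : xs.Pairwise (· < ·)) (x : String) :
    (pvIns xs x).Perm (if x ∈ xs then xs else x :: xs) := by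
  induction xs with
  | nil => simp [pvIns]
  | cons z zs ih =>
      rcases List.pairwise_cons.mp h with ⟨hz, hzs⟩
      by_cases h1 : z < x
      · have hzx : z ≠ x := ne_of_lt h1
        simp only [pvIns]
        rw [if_pos h1]
        by_cases hm : x ∈ zs
        · rw [if_pos (by simp [hm])]
          have h2 := ih hzs
          rw [if_pos hm] at h2
          exact h2.cons z
        · rw [if_neg (by simp [hm, Ne.symm hzx])]
          have h2 := ih hzs
          rw [if_neg hm] at h2
          exact (h2.cons z).trans (List.Perm.swap x z zs)
      · by_cases h2 : z = x
        · subst h2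
          simp [pvIns]
        · have hx : x < z := lt_of_le_of_ne (le_of_not_gt h1) (Ne.symm h2)
          have hnm : x ∉ z :: zs := by
            intro hmem
            rcases List.mem_cons.mp hmem with rfl | hmem
            · exact h2 rfl
            · exact absurd (hz x hmem) (not_lt_of_gt hx)
          simp only [pvIns]
          rw [if_neg h1, if_neg h2, if_neg hnm]

theorem pvRm_eq_erase (xs : List String) (x : String) : pvRm xs x = xs.erase x := by
  induction xs with
  | nil => rfl
  | cons h t ih =>
      simp only [pvRm, List.erase_cons, beq_iff_eq]
      split_ifs with he
      · rfl
      · rw [ih]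

theorem pv_keys_erase (d : PySem.Dict String Int) (k : String) :
    (d.erase k).keys = d.keys.filter (fun x => x != k) := by
  simp [PySem.Dict.erase, PySem.Dict.keys, List.filter_map, Function.comp_def, bne]

theorem pv_insert_side {d : PySem.Dict String Int} {xs : List String}
    (hp : xs.Pairwise (· < ·)) (hperm : xs.Perm d.keys) (p : String) (v : Int) :
    (pvIns xs p).Pairwise (· < ·) ∧ (pvIns xs p).Perm (d.insert p v).keys := by
  refine ⟨pairwise_pvIns hp p, ?_⟩
  by_cases hm : p ∈ xs
  · have hc : d.contains p = true :=
      (PySem.Dict.contains_iff_mem_keys d p).mpr (hperm.mem_iff.mp hm)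
    rw [PySem.Dict.keys_insert_of_contains d v hc]
    have := perm_pvIns hp p
    rw [if_pos hm] at this
    exact this.trans hperm
  · have hc : d.contains p = false := by
      cases hcc : d.contains p
      · rfl
      · exact absurd (hperm.mem_iff.mpr ((PySem.Dict.contains_iff_mem_keys d p).mp hcc)) hm
    rw [PySem.Dict.keys_insert_of_not_contains d v hc]
    have h1 := perm_pvIns hp p
    rw [if_neg hm] at h1
    exact h1.trans ((hperm.cons p).trans (List.perm_append_singleton p d.keys).symm)

theorem pv_erase_side {d : PySem.Dict String Int} {xs : List String}
    (hp : xs.Pairwise (· < ·)) (hperm : xs.Perm d.keys) (p : String) :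
    (pvRm xs p).Pairwise (· < ·) ∧ (pvRm xs p).Perm (d.erase p).keys := by
  rw [pvRm_eq_erase]
  refine ⟨List.Pairwise.sublist List.erase_sublist hp, ?_⟩
  have hnd : d.keys.Nodup := (hperm.nodup_iff).mp (hp.nodup)
  rw [pv_keys_erase, ← hnd.erase_eq_filter p]
  exact hperm.erase p

theorem pv_step_rel (pd : PySem.Dict String (PySem.Dict String String)) (f : String)
    {stA : PySem.Dict String Int × PySem.Dict String Int} {stB : List String × List String}
    (h : pvRel stA stB) : pvRel (pvStepA pd stA f) (pvUpd pd stB f) := by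
  obtain ⟨h1, h2, h3, h4⟩ := h
  unfold pvStepA pvUpd
  split_ifs with hs he
  · obtain ⟨a1, a2⟩ := pv_insert_side h1 h2 (PySem.Str.replace f "s_" "") 5
    obtain ⟨b1, b2⟩ := pv_insert_side h3 h4 (pvGene pd (PySem.Str.replace f "s_" "")) 5
    exact ⟨a1, a2, b1, b2⟩
  · obtain ⟨a1, a2⟩ := pv_erase_side h1 h2 (PySem.Str.replace f "e_" "")
    obtain ⟨b1, b2⟩ := pv_erase_side h3 h4 (pvGene pd (PySem.Str.replace f "e_" ""))
    exact ⟨a1, a2, b1, b2⟩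
  · exact ⟨h1, h2, h3, h4⟩

theorem pv_foldl_rel (pd : PySem.Dict String (PySem.Dict String String)) (fs : List String)
    {stA : PySem.Dict String Int × PySem.Dict String Int} {stB : List String × List String}
    (h : pvRel stA stB) : pvRel (fs.foldl (pvStepA pd) stA) (fs.foldl (pvUpd pd) stB) := by
  induction fs generalizing stA stB with
  | nil => exact h
  | cons f fs ih => exact ih (pv_step_rel pd f h)

theorem pv_out_side {d : PySem.Dict String Int} {xs : List String}
    (hp : xs.Pairwise (· < ·)) (hperm : xs.Perm d.keys) :
    PySem.List.sorted d.keys (fun x => x) = xs ∧ ((d.size : Int) = PySem.List.len xs) := by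
  constructor
  · exact PySem.List.sorted_eq_of_perm_of_pairwise_lt d.keys xs (fun x => x) hperm hp
  · have : xs.length = d.keys.length := hperm.length_eq
    simp [PySem.Dict.size, PySem.Dict.keys, PySem.List.len_eq] at *
    omega

-- '\t'.join([...]) + '\n' spelled out as A's f-string concatenation
theorem pv_join_out (c p n us ue mgcs mgl pc pl gc gl : String) :
    PySem.Str.join "\t" [c, p, n, us, ue, mgcs, mgl, pc, pl, gc, gl] ++ "\n" =
      c ++ "\t" ++ p ++ "\t" ++ n ++ "\t" ++ us ++ "\t" ++ ue ++ "\t" ++ mgcs ++ "\t" ++ mgl ++ "\t" ++ pc ++ "\t" ++ pl ++ "\t" ++ gc ++ "\t" ++ gl ++ "\n" := by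
  apply String.toList_injective
  simp [PySem.Str.join, PySem.Chars.join, List.intercalate]

theorem pv_join_bed (c p n gc : String) :
    PySem.Str.join "\t" [c, p, n, gc] ++ "\n" = c ++ "\t" ++ p ++ "\t" ++ n ++ "\t" ++ gc ++ "\n" := by
  apply String.toList_injective
  simp [PySem.Str.join, PySem.Chars.join, List.intercalate]

theorem pv_join_union (c us ue mgcs mgl : String) :
    PySem.Str.join "\t" [c, us, ue, mgcs, mgl] ++ "\n" =
      c ++ "\t" ++ us ++ "\t" ++ ue ++ "\t" ++ mgcs ++ "\t" ++ mgl ++ "\n" := by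
  apply String.toList_injective
  simp [PySem.Str.join, PySem.Chars.join, List.intercalate]

-- A's sweep equals B's staged snapshot-then-format passes
theorem pv_loop_stage (cd : PySem.Dict Int String) (pd : PySem.Dict String (PySem.Dict String String))
    (chromo us ue mgcs mgl : String) :
    ∀ (ps : List Int) (stA : PySem.Dict String Int × PySem.Dict String Int)
      (stB : List String × List String), pvRel stA stB →
      pvLoopA cd pd chromo us ue mgcs mgl ps stA =
        (((ps.zip (ps.drop 1)).zip (pvSnaps cd pd ps.dropLast stB)).map (pvOutF chromo us ue mgcs mgl),
         ((pvSnaps cd pd ps.dropLast stB).zip (ps.zip (ps.drop 1))).map (pvBedF chromo)) := by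
  intro ps
  induction ps with
  | nil => intro stA stB _; rfl
  | cons pos rest ih =>
      intro stA stB h
      cases rest with
      | nil => rfl
      | cons next rest' =>
          have hrel := pv_foldl_rel pd ((PySem.Str.split? (cd.getD pos "") "|").getD []) h
          obtain ⟨h1, h2, h3, h4⟩ := hrel
          obtain ⟨e1, e2⟩ := pv_out_side h1 h2
          obtain ⟨e3, e4⟩ := pv_out_side h3 h4
          simp only [pvLoopA]
          rw [ih _ _ (pv_foldl_rel pd _ h)]
          simp only [pvSnaps, List.dropLast_cons_of_ne_nil (List.cons_ne_nil next rest'),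
            List.zip_cons_cons, List.drop_succ_cons, List.drop_zero, List.map_cons]
          refine Prod.ext ?_ ?_
          · simp only [pvOutF, pv_join_out, e1, e2, e3, e4]
          · simp only [pvBedF, pv_join_bed, e4]

-- ===== VERDICT (by name: the statement is the Claim_ definition above) =====
theorem process_last_matches_spec : Claim_equal_process_last_matches := by
  intro coord chromo gene_set pdict _ _
  unfold Spec_process_last_matches process_last_matches process_last_matches_alt
  cases gene_set with
  | nil => simp [PySem.List.len]
  | cons g gs =>
      rw [if_pos (by simp [PySem.List.len_eq])]
      simp only [List.isEmpty_cons, Bool.false_eq_true, if_false]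
      rw [pv_loop_stage _ _ _ _ _ _ _ _ (PySem.Dict.empty, PySem.Dict.empty) ([], [])
        ⟨List.Pairwise.nil, by simp [PySem.Dict.keys_empty], List.Pairwise.nil, by simp [PySem.Dict.keys_empty]⟩]
      rw [pv_join_union]
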